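-- pv_equiv track=rewrite | github.com/LSartore/pyrate | src/PyLie/Math.py | _rebuildPartitionFromSequence
-- ===== SOURCE A (Python) =====
-- def _rebuildPartitionFromSequence(sequence):
--     """
--     (* See arXiv:math/0309225v1[math.CO] - this is an auxiliar method to calculate SnClassCharacter *)
--     (* RebuiltPartitionFromSequence[PartitionSequence[partition]]=partition *)
--     """
--     counter1s = 0
--     result = []
--     for i in range(len(sequence)):
--         if sequence[i] == 0:
--             result.insert(0, counter1s)
--         else:
--             counter1s += 1
--     return [el for el in result if el != 0]
-- ===== SOURCE B (Python) =====
-- def _rebuildPartitionFromSequence(sequence):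
--     # Pass 1: prefix table of cumulative nonzero-counts (prefix[i] = #nonzeros in sequence[:i]).
--     prefix = [0]
--     for el in sequence:
--         prefix.append(prefix[-1] + (el != 0))
--     # Pass 2: select the cumulative count at each zero position, back-to-front, drop zero parts.
--     parts = [p for el, p in zip(sequence, prefix[1:]) if el == 0]
--     return [p for p in reversed(parts) if p != 0]
-- ===== Notes on version B (the rewrite author's own statement) =====
-- stated objective: alternative
-- what changed: A's single interleaved loop (running counter plus repeated list.insert(0,...)) is replaced by two separated passes: first a cumulative nonzero-count table is built, then a select pass reads the table at zero positions and the list is reversed once; no front-insertion is performed.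
import Mathlib
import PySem

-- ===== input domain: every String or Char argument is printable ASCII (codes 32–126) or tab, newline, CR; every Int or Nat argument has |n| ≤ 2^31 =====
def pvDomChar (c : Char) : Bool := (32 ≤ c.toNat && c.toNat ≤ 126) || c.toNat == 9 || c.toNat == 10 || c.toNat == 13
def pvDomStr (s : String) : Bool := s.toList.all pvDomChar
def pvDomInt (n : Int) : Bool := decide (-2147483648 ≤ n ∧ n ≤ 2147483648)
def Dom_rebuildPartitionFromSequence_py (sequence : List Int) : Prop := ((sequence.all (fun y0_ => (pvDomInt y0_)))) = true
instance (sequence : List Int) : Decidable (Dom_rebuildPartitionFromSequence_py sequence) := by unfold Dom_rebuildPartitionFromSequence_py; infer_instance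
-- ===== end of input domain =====

-- B replaces A's interleaved counter-and-prepend loop by two separated passes (prefix-count table, then select+reverse); objective: alternative.

-- ===== PORT A =====
-- A's for-loop over indices, carrying the running counter and the result list
-- (result.insert(0, c) becomes consing c to the front).
def rebuildLoopA : List Int → Int → List Int → List Int
  | [], _, result => result
  | x :: xs, counter1s, result =>
    if x = 0 then rebuildLoopA xs counter1s (counter1s :: result)
    else rebuildLoopA xs (counter1s + 1) result

def rebuildPartitionFromSequence_py (sequence : List Int) : List Int :=
  (rebuildLoopA sequence 0 []).filter (fun el => decide (el ≠ 0))

-- ===== PORT B =====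
-- Pass 1 of Source B: the prefix table (here prefix[1:], i.e. cumulative counts
-- including each element, built from the running last value).
def prefixTail : List Int → Int → List Int
  | [], _ => []
  | el :: rest, last =>
    let v := last + (if el ≠ 0 then 1 else 0)
    v :: prefixTail rest v

def rebuildPartitionFromSequence_py_alt (sequence : List Int) : List Int :=
  let pref : List Int := 0 :: prefixTail sequence 0
  let parts := (sequence.zip (pref.drop 1)).filterMap
    (fun ep => if ep.1 = 0 then some ep.2 else none)
  parts.reverse.filter (fun p => decide (p ≠ 0))

-- ===== PRECONDITION & SPEC =====
def Spec_rebuildPartitionFromSequence_py (sequence : List Int) (out : List Int) : Prop := out = rebuildPartitionFromSequence_py_alt sequence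
instance (sequence : List Int) (out : List Int) : Decidable (Spec_rebuildPartitionFromSequence_py sequence out) := by unfold Spec_rebuildPartitionFromSequence_py; infer_instance

-- ===== CLAIM (what is proved, stated in full; the proofs are below) =====
def Claim_equal_rebuildPartitionFromSequence_py : Prop := ∀ (sequence : List Int), Dom_rebuildPartitionFromSequence_py sequence → Spec_rebuildPartitionFromSequence_py sequence (rebuildPartitionFromSequence_py sequence)

-- ===== LEMMAS AND PROOFS =====

-- the common intermediate: counts selected at zero positions, in forward order
def selCounts : List Int → Int → List Int
  | [], _ => []
  | x :: xs, c => if x = 0 then c :: selCounts xs c else selCounts xs (c + 1)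

theorem rebuildLoopA_eq (xs : List Int) : ∀ (c : Int) (res : List Int),
    rebuildLoopA xs c res = (selCounts xs c).reverse ++ res := by
  induction xs with
  | nil => intro c res; simp [rebuildLoopA, selCounts]
  | cons x xs ih =>
    intro c res
    by_cases h : x = 0 <;> simp [rebuildLoopA, selCounts, h, ih]

theorem zip_prefixTail_eq (xs : List Int) : ∀ (c : Int),
    (xs.zip (prefixTail xs c)).filterMap
      (fun ep => if ep.1 = 0 then some ep.2 else none) = selCounts xs c := by
  induction xs with
  | nil => intro c; simp [prefixTail, selCounts]
  | cons x xs ih =>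
    intro c
    by_cases h : x = 0 <;>
      simp [prefixTail, selCounts, h, List.zip_cons_cons, ih]

-- ===== VERDICT (by name: the statement is the Claim_ definition above) =====
theorem rebuildPartitionFromSequence_py_spec : Claim_equal_rebuildPartitionFromSequence_py := by
  intro sequence _
  unfold Spec_rebuildPartitionFromSequence_py
  unfold rebuildPartitionFromSequence_py rebuildPartitionFromSequence_py_alt
  simp [rebuildLoopA_eq, zip_prefixTail_eq]
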